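-- pv_equiv track=rewrite | github.com/KKranthi6881/Data-Architect | knowledge-chat-backend/src/dbt_tools.py | _extract_calculation_before_alias
-- ===== SOURCE A (Python) =====
-- from typing import Dict, List, Any, Optional, Tuple, Set
--
-- def _extract_calculation_before_alias(content: str, alias_pos: int) -> Optional[str]:
--     """Extract the calculation expression that comes before 'as column_name'"""
--     # Find the relevant portion of the content before this position
--     preceding_content = content[:alias_pos].strip()
--
--     # Try to find the start of this expression by looking for commas, SELECT, or other clauses
--     last_comma = preceding_content.rfind(',')
--     last_select = preceding_content.lower().rfind('select')
--     last_from = preceding_content.lower().rfind('from')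
--     last_join = preceding_content.lower().rfind('join')
--     last_where = preceding_content.lower().rfind('where')
--
--     # Find the most recent relevant SQL keyword or separator
--     start_points = [p for p in [last_comma, last_select, last_from, last_join, last_where] if p >= 0]
--     if not start_points:
--         return None
--
--     start_pos = max(start_points)
--
--     # Extract the calculation part (from the last clause start to the alias position)
--     calculation = preceding_content[start_pos:].strip()
--
--     # Remove trailing comma if any
--     if calculation.startswith(','):
--         calculation = calculation[1:].strip()
--
--     return calculation
-- ===== SOURCE B (Python) =====
-- from typing import Optional
--
-- def _extract_calculation_before_alias(content: str, alias_pos: int) -> Optional[str]: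
--     """One right-to-left pass locating the rightmost separator, instead of five rfind scans + max."""
--     p = content[:alias_pos].strip()
--     lp = p.lower()
--     for i in range(len(p) - 1, -1, -1):
--         if (p[i] == ',' or lp[i:i+6] == 'select' or lp[i:i+4] == 'from'
--                 or lp[i:i+4] == 'join' or lp[i:i+5] == 'where'):
--             calculation = p[i:].strip()
--             if calculation.startswith(','):
--                 calculation = calculation[1:].strip()
--             return calculation
--     return None
-- ===== Notes on version B (the rewrite author's own statement) =====
-- stated objective: alternative
-- what changed: A runs five independent full-string rfind scans (comma/select/from/join/where) and takes the max of the non-negative hits; B makes a single right-to-left pass over the stripped prefix and stops at the first index where any of the five separators starts, which is the same rightmost position.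
import Mathlib
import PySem

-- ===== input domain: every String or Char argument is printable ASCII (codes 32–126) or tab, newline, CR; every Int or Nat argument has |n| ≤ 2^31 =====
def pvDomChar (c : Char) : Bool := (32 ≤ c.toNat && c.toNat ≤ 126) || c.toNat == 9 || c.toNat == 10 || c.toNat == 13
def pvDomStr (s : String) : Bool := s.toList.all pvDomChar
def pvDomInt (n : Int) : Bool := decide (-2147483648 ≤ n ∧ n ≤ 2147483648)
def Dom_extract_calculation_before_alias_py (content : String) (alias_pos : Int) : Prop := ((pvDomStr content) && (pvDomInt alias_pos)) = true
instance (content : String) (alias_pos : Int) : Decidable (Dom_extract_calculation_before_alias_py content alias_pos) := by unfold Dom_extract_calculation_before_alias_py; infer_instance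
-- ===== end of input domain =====

-- B replaces A's five independent rfind scans + max by ONE right-to-left scan stopping at the
-- first (rightmost) index where a separator (',', 'select', 'from', 'join', 'where') starts;
-- objective: alternative decomposition, same exact result.

-- ===== PORT A =====
def extract_calculation_before_alias_py (content : String) (alias_pos : Int) : Option String :=
  let preceding_content := PySem.Str.strip (PySem.Str.slice content none (some alias_pos))
  let last_comma := PySem.Str.rfind preceding_content ","
  let last_select := PySem.Str.rfind (PySem.Str.lower preceding_content) "select"
  let last_from := PySem.Str.rfind (PySem.Str.lower preceding_content) "from"
  let last_join := PySem.Str.rfind (PySem.Str.lower preceding_content) "join"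
  let last_where := PySem.Str.rfind (PySem.Str.lower preceding_content) "where"
  let start_points := [last_comma, last_select, last_from, last_join, last_where].filter (fun p => decide (0 ≤ p))
  -- `if not start_points: return None` + `max(start_points)`: max? is none exactly on the empty list
  match PySem.List.max? start_points (fun p => p) with
  | none => none
  | some start_pos =>
    let calculation := PySem.Str.strip (PySem.Str.slice preceding_content (some start_pos) none)
    if PySem.Str.startswith calculation "," then
      some (PySem.Str.strip (PySem.Str.slice calculation (some 1) none))
    else
      some calculation

-- ===== PORT B =====
-- Source B's separator test at index i: p[i] == ',' or lp[i:i+6]=='select' or lp[i:i+4]=='from'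
-- or lp[i:i+4]=='join' or lp[i:i+5]=='where'  (i < len p, so list take/getElem? are exact)
def pvSep (pcl lcl : List Char) (i : Nat) : Bool :=
  pcl[i]? == some ',' || (lcl.drop i).take 6 == "select".toList || (lcl.drop i).take 4 == "from".toList
    || (lcl.drop i).take 4 == "join".toList || (lcl.drop i).take 5 == "where".toList

-- Source B's `for i in range(len(p)-1, -1, -1)` loop, started at the top index
def pvScan (pcl lcl : List Char) : Nat → Option Nat
  | 0 => if pvSep pcl lcl 0 then some 0 else none
  | j+1 => if pvSep pcl lcl (j+1) then some (j+1) else pvScan pcl lcl j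

def extract_calculation_before_alias_py_alt (content : String) (alias_pos : Int) : Option String :=
  let p := PySem.Str.strip (PySem.Str.slice content none (some alias_pos))
  let lp := PySem.Str.lower p
  match p.toList.length with
  | 0 => none
  | m+1 =>
    match pvScan p.toList lp.toList m with
    | none => none
    | some i =>
      let calculation := PySem.Str.strip (PySem.Str.slice p (some (i : Int)) none)
      if PySem.Str.startswith calculation "," then
        some (PySem.Str.strip (PySem.Str.slice calculation (some 1) none))
      else
        some calculation

-- ===== PRECONDITION & SPEC =====
def Spec_extract_calculation_before_alias_py (content : String) (alias_pos : Int) (out : Option String) : Prop := out = extract_calculation_before_alias_py_alt content alias_pos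
instance (content : String) (alias_pos : Int) (out : Option String) : Decidable (Spec_extract_calculation_before_alias_py content alias_pos out) := by unfold Spec_extract_calculation_before_alias_py; infer_instance

-- ===== CLAIM (what is proved, stated in full; the proofs are below) =====
def Claim_equal_extract_calculation_before_alias_py : Prop := ∀ (content : String) (alias_pos : Int), Dom_extract_calculation_before_alias_py content alias_pos → Spec_extract_calculation_before_alias_py content alias_pos (extract_calculation_before_alias_py content alias_pos)

theorem pv_go_zero (s sub : List Char) :
    PySem.Chars.rfind.go s sub 0 = if sub.isPrefixOf s then 0 else -1 := by
  rw [PySem.Chars.rfind.go]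

theorem pv_go_succ (s sub : List Char) (j : Nat) :
    PySem.Chars.rfind.go s sub (j+1)
      = if sub.isPrefixOf (s.drop (j+1)) then ((j+1 : Nat) : Int) else PySem.Chars.rfind.go s sub j := by
  rw [PySem.Chars.rfind.go]

theorem pv_go_le (s sub : List Char) : ∀ i : Nat, PySem.Chars.rfind.go s sub i ≤ (i : Int) := by
  intro i
  induction i with
  | zero => rw [pv_go_zero]; split <;> simp
  | succ j ih =>
    rw [pv_go_succ]
    split
    · simp
    · exact le_trans ih (by push_cast; omega)

theorem pv_take_beq (p l : List Char) (n : Nat) (h : p.length = n) : (l.take n == p) = p.isPrefixOf l := by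
  subst h
  by_cases hp : p <+: l
  · have ht : l.take p.length = p := (List.prefix_iff_eq_take.mp hp).symm
    rw [ht]; simp [List.isPrefixOf_iff_prefix, hp]
  · rw [Bool.eq_iff_iff]
    simp only [beq_iff_eq, List.isPrefixOf_iff_prefix, hp, iff_false]
    intro hc
    exact absurd (List.prefix_iff_eq_take.mpr hc.symm) hp

theorem pv_head_beq (l : List Char) (c : Char) : (l[0]? == some c) = [c].isPrefixOf l := by
  cases l with
  | nil => rfl
  | cons a t => simp [List.isPrefixOf, eq_comm]

theorem pv_sep_eq (pcl lcl : List Char) (i : Nat) :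
    pvSep pcl lcl i = ([','].isPrefixOf (pcl.drop i) || "select".toList.isPrefixOf (lcl.drop i)
      || "from".toList.isPrefixOf (lcl.drop i) || "join".toList.isPrefixOf (lcl.drop i)
      || "where".toList.isPrefixOf (lcl.drop i)) := by
  have h0 : pcl[i]? = (pcl.drop i)[0]? := by simp [List.getElem?_drop]
  rw [pvSep, h0, pv_head_beq,
    pv_take_beq "select".toList _ 6 rfl, pv_take_beq "from".toList _ 4 rfl,
    pv_take_beq "join".toList _ 4 rfl, pv_take_beq "where".toList _ 5 rfl]

theorem pv_max?_eq_some (l : List Int) (x : Int) (hx : x ∈ l) (hall : ∀ y ∈ l, y ≤ x) :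
    PySem.List.max? l (fun p => p) = some x := by
  cases h : PySem.List.max? l (fun p => p) with
  | none =>
    rw [(PySem.List.max?_eq_none_iff l _).mp h] at hx
    exact absurd hx (List.not_mem_nil)
  | some m =>
    have hm : m ∈ l := PySem.List.max?_mem h
    exact congrArg some (le_antisymm (hall m hm) (PySem.List.max?_isMax h x hx))

theorem pv_scan_max (pcl lcl : List Char) : ∀ i : Nat,
    PySem.List.max? (([PySem.Chars.rfind.go pcl [','] i,
        PySem.Chars.rfind.go lcl "select".toList i,
        PySem.Chars.rfind.go lcl "from".toList i,
        PySem.Chars.rfind.go lcl "join".toList i,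
        PySem.Chars.rfind.go lcl "where".toList i]).filter (fun p => decide (0 ≤ p))) (fun p => p)
    = (pvScan pcl lcl i).map (fun j => (j : Int)) := by
  intro i
  induction i with
  | zero =>
    by_cases hsep : pvSep pcl lcl 0 = true
    · have hsep' := hsep
      rw [pv_sep_eq] at hsep'
      simp only [pvScan, hsep, if_true]
      apply pv_max?_eq_some
      · simp only [Bool.or_eq_true] at hsep'
        refine List.mem_filter.mpr ⟨?_, by simp⟩
        rcases hsep' with ((((h | h) | h) | h) | h) <;> simp at h <;>
          simp [h, pv_go_zero]
      · intro y hy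
        simp only [List.mem_filter, List.mem_cons, List.not_mem_nil, or_false] at hy
        rcases hy.1 with h | h | h | h | h <;> subst h <;>
          simp only [pv_go_zero] <;> split <;> omega
    · have hsep' := hsep
      rw [pv_sep_eq] at hsep'
      simp only [Bool.or_eq_true, not_or, Bool.not_eq_true] at hsep'
      obtain ⟨⟨⟨⟨h1, h2⟩, h3⟩, h4⟩, h5⟩ := hsep'
      simp only [pvScan, hsep, Bool.false_eq_true, if_false]
      simp at h1 h2 h3 h4 h5
      simp [pv_go_zero, h1, h2, h3, h4, h5, List.filter, PySem.List.max?]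
  | succ j ih =>
    by_cases hsep : pvSep pcl lcl (j+1) = true
    · have hsep' := hsep
      rw [pv_sep_eq] at hsep'
      simp only [pvScan, hsep, if_true, Option.map_some]
      apply pv_max?_eq_some
      · simp only [Bool.or_eq_true] at hsep'
        refine List.mem_filter.mpr ⟨?_, by simp only [decide_eq_true_eq]; omega⟩
        rcases hsep' with ((((h | h) | h) | h) | h) <;> simp at h <;>
          simp [h, pv_go_succ]
      · intro y hy
        have g1 := pv_go_le pcl [','] j
        have g2 := pv_go_le lcl "select".toList j
        have g3 := pv_go_le lcl "from".toList j
        have g4 := pv_go_le lcl "join".toList j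
        have g5 := pv_go_le lcl "where".toList j
        simp only [List.mem_filter, List.mem_cons, List.not_mem_nil, or_false] at hy
        rcases hy.1 with h | h | h | h | h <;> subst h <;>
          simp only [pv_go_succ] <;> split <;> push_cast at * <;> omega
    · have hsep' := hsep
      rw [pv_sep_eq] at hsep'
      simp only [Bool.or_eq_true, not_or, Bool.not_eq_true] at hsep'
      obtain ⟨⟨⟨⟨h1, h2⟩, h3⟩, h4⟩, h5⟩ := hsep'
      simp only [pvScan, hsep, Bool.false_eq_true, if_false]
      rw [pv_go_succ, pv_go_succ, pv_go_succ, pv_go_succ, pv_go_succ,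
        if_neg (by simp [← List.isPrefixOf_iff_prefix]; exact h1), if_neg (by simp [← List.isPrefixOf_iff_prefix]; exact h2), if_neg (by simp [← List.isPrefixOf_iff_prefix]; exact h3),
        if_neg (by simp [← List.isPrefixOf_iff_prefix]; exact h4), if_neg (by simp [← List.isPrefixOf_iff_prefix]; exact h5)]
      exact ih

theorem pv_sep_top (pcl lcl : List Char) (h : lcl.length = pcl.length) :
    pvSep pcl lcl pcl.length = false := by
  have h1 : pcl[pcl.length]? = none := by simp
  have h2 : lcl.drop pcl.length = [] := by rw [← h]; exact List.drop_length
  rw [pvSep, h1, h2]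
  rfl

-- ===== VERDICT (by name: the statement is the Claim_ definition above) =====
theorem extract_calculation_before_alias_py_spec : Claim_equal_extract_calculation_before_alias_py := by
  intro content alias_pos _
  unfold Spec_extract_calculation_before_alias_py
  unfold extract_calculation_before_alias_py extract_calculation_before_alias_py_alt
  set pc := PySem.Str.strip (PySem.Str.slice content none (some alias_pos)) with hpc
  have hlen : (PySem.Str.lower pc).toList.length = pc.toList.length := by
    rw [PySem.Str.toList_lower]; simp [PySem.Chars.lower]
  simp only [PySem.Str.rfind_eq, PySem.Chars.rfind, hlen,
    show (",".toList) = [','] from rfl]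
  rw [pv_scan_max pc.toList (PySem.Str.lower pc).toList]
  cases hn : pc.toList.length with
  | zero =>
    have hnil : pc.toList = [] := List.length_eq_zero_iff.mp hn
    have hlnil : (PySem.Str.lower pc).toList = [] := List.length_eq_zero_iff.mp (by rw [hlen, hn])
    simp [pvScan, pvSep, hnil, hlnil]
  | succ m =>
    have htop : pvSep pc.toList (PySem.Str.lower pc).toList (m+1) = false :=
      hn ▸ pv_sep_top pc.toList (PySem.Str.lower pc).toList hlen
    simp only [pvScan, htop, Bool.false_eq_true, if_false]
    cases hscan : pvScan pc.toList (PySem.Str.lower pc).toList m with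
    | none => simp
    | some j => simp
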